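-- pv_equiv track=rewrite | github.com/edmanf/Cryptopals | utils.py | count_repeats
-- ===== SOURCE A (Python) =====
-- def count_repeats(a, block_length):
--     block_counts = {}
--     blocks = make_blocks(a, block_length)
--     for block in blocks:
--         b = bytes(block)
--         if b in block_counts:
--             block_counts[b] += 1
--         else:
--             block_counts[b] = 0
--     return sum(block_counts.values())
--
-- def make_blocks(a, key_size):
--     blocks = []
--     for i in range(len(a) // key_size):
--         block = a[i * key_size:i * key_size + key_size]
--         blocks.append(block)
--
--     return blocks
-- ===== SOURCE B (Python) =====
-- def count_repeats(a, block_length):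
--     n = len(a) // block_length
--     blocks = sorted(bytes(a[i * block_length:i * block_length + block_length]) for i in range(n))
--     return sum(1 for prev, cur in zip(blocks, blocks[1:]) if prev == cur)
-- ===== Notes on version B (the rewrite author's own statement) =====
-- stated objective: alternative
-- what changed: B replaces A's hash-dict of per-block excess counts (summed at the end) with sort-then-scan: it sorts the blocks, which puts equal blocks adjacent, and counts adjacent equal pairs with a single zip scan; each run of m equal blocks contributes m-1, the same total as A's counter.
-- outside the precondition, e.g. on count_repeats([300, 1, 1], 2): A raises ValueError, B raises ValueError; on count_repeats([], 0): A raises ZeroDivisionError, B raises ZeroDivisionError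
import Mathlib
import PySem

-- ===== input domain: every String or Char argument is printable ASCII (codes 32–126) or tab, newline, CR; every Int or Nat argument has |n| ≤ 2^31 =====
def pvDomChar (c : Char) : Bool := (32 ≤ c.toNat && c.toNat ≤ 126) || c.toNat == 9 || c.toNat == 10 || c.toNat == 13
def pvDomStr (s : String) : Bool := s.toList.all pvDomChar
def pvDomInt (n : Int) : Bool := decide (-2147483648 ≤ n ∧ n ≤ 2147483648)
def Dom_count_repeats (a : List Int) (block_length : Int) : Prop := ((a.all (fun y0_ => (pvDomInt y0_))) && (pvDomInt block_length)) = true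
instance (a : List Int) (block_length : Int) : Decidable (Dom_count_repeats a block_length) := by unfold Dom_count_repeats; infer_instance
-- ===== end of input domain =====

-- B replaces A's per-block counter dict + sum-of-counts with sort-then-scan: sort the blocks and count adjacent equal pairs (objective: alternative).


-- ===== PORT A =====
def make_blocks (a : List Int) (key_size : Int) : List (List Int) :=
  (PySem.List.pyRange 0 (PySem.Int.floordiv (a.length : Int) key_size) 1).foldl
    (fun blocks i => blocks ++ [PySem.List.slice a (some (i * key_size)) (some (i * key_size + key_size))])
    []

def count_repeats (a : List Int) (block_length : Int) : Int :=
  let blocks := make_blocks a block_length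
  let block_counts := blocks.foldl
    (fun d block =>
      if d.contains block then d.insert block (d.getD block 0 + 1)
      else d.insert block 0)
    (PySem.Dict.empty : PySem.Dict (List Int) Int)
  block_counts.values.sum

-- ===== PORT B =====
def count_repeats_alt (a : List Int) (block_length : Int) : Int :=
  let n := PySem.Int.floordiv (a.length : Int) block_length
  let blocks := PySem.List.sorted
    ((PySem.List.pyRange 0 n 1).map
      (fun i => PySem.List.slice a (some (i * block_length)) (some (i * block_length + block_length))))
    (fun b => b) false
  (((blocks.zip (PySem.List.slice blocks (some 1) none)).countP (fun p => p.1 == p.2) : Nat) : Int)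

-- ===== PRECONDITION & SPEC =====
-- Pre_ excludes exactly the inputs on which Python's A raises: block_length = 0 (ZeroDivisionError
-- from len(a) // block_length) and, for positive block_length, any element inside the sliced blocks
-- (the first n*block_length elements) outside 0..255 (ValueError from bytes(block)); B raises there too.
def Pre_count_repeats (a : List Int) (block_length : Int) : Prop :=
  block_length ≠ 0 ∧
  (0 < block_length →
    ∀ x ∈ a.take ((a.length / block_length.toNat) * block_length.toNat), 0 ≤ x ∧ x < 256)
instance (a : List Int) (block_length : Int) : Decidable (Pre_count_repeats a block_length) := by unfold Pre_count_repeats; infer_instance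
def pvWitness_count_repeats : List Int × Int := ([0, 1, 0, 1, 7], 2)
def Spec_count_repeats (a : List Int) (block_length : Int) (out : Int) : Prop := out = count_repeats_alt a block_length
instance (a : List Int) (block_length : Int) (out : Int) : Decidable (Spec_count_repeats a block_length out) := by unfold Spec_count_repeats; infer_instance

-- ===== CLAIM (what is proved, stated in full; the proofs are below) =====
def Claim_equal_count_repeats : Prop := ∀ (a : List Int) (block_length : Int), Dom_count_repeats a block_length → Pre_count_repeats a block_length → Spec_count_repeats a block_length (count_repeats a block_length)

-- ===== LEMMAS AND PROOFS =====

theorem make_blocks_eq_map (a : List Int) (bl : Int) :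
    make_blocks a bl = (PySem.List.pyRange 0 (PySem.Int.floordiv (a.length : Int) bl) 1).map
      (fun i => PySem.List.slice a (some (i * bl)) (some (i * bl + bl))) := by
  unfold make_blocks
  rw [PySem.List.foldl_append_singleton_eq_map]
  simp

-- the body of A's loop is an insert with a computed value
theorem stepA_eq (d : PySem.Dict (List Int) Int) (b : List Int) :
    (if d.contains b then d.insert b (d.getD b 0 + 1) else d.insert b 0)
      = d.insert b (if d.contains b then d.getD b 0 + 1 else 0) := by
  by_cases h : d.contains b <;> simp [h]

-- replacing the (unique) pair keyed k by (k, v) changes the value sum by v - old value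
theorem sum_replace (l : List (List Int × Int)) (k : List Int) (v : Int)
    (hnd : (l.map Prod.fst).Nodup) (hmem : (l.any (fun p => p.1 == k)) = true) :
    ((l.map (fun p => if (p.1 == k) = true then (k, v) else p)).map Prod.snd).sum
      = (l.map Prod.snd).sum + v - ((Option.map Prod.snd (l.find? (fun p => p.1 == k))).getD 0) := by
  induction l with
  | nil => simp at hmem
  | cons p t ih =>
    by_cases hp : (p.1 == k) = true
    · have hk : p.1 = k := by simpa using hp
      have hknot : k ∉ t.map Prod.fst := by
        simp only [List.map_cons, List.nodup_cons] at hnd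
        exact hk ▸ hnd.1
      have hnot : ∀ q ∈ t, ¬ ((q.1 == k) = true) := by
        intro q hq hqk
        exact hknot ((by simpa using hqk : q.1 = k) ▸ List.mem_map_of_mem hq)
      have ht : t.map (fun p => if (p.1 == k) = true then (k, v) else p) = t := by
        conv_rhs => rw [← List.map_id t]
        exact List.map_congr_left (fun q hq => by rw [if_neg (hnot q hq)]; rfl)
      simp only [List.map_cons, List.sum_cons, List.find?_cons, hp, ht, if_pos,
        Option.map_some, Option.getD_some]
      ring
    · have hmem' : (t.any (fun p => p.1 == k)) = true := by
        simp [List.any_cons, hp] at hmem ⊢; tauto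
      have hnd' : (t.map Prod.fst).Nodup := by
        simp [List.nodup_cons] at hnd; exact hnd.2
      simp only [List.map_cons, List.sum_cons, List.find?_cons, hp, if_neg, Bool.false_eq_true,
        not_false_eq_true]
      rw [ih hnd' hmem']
      ring

-- one step of A's loop raises (sum of values) + (number of keys) by exactly 1
theorem step_measure (d : PySem.Dict (List Int) Int) (b : List Int) (hnd : d.keys.Nodup) :
    (d.insert b (if d.contains b then d.getD b 0 + 1 else 0)).values.sum
      + ((d.insert b (if d.contains b then d.getD b 0 + 1 else 0)).keys.length : Int)
      = d.values.sum + (d.keys.length : Int) + 1 := by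
  by_cases hc : d.contains b = true
  · have hkeys := PySem.Dict.keys_insert_of_contains d (if d.contains b then d.getD b 0 + 1 else 0) hc
    have hmem : (d.items.any (fun p => p.1 == b)) = true := hc
    have hnd' : (d.items.map Prod.fst).Nodup := hnd
    have hv : (d.insert b (d.getD b 0 + 1)).values.sum = d.values.sum + 1 := by
      show ((PySem.Dict.insert d b _).items.map Prod.snd).sum = _
      simp only [PySem.Dict.insert, hc, if_true]
      rw [sum_replace d.items b (d.getD b 0 + 1) hnd' hmem]
      have h0 : d.getD b 0 = (Option.map Prod.snd (d.items.find? (fun p => p.1 == b))).getD 0 := rfl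
      rw [← h0]
      simp only [PySem.Dict.values]
      ring
    simp only [hc, if_true] at hkeys ⊢
    rw [hkeys, hv]
    ring
  · have hc' : d.contains b = false := by simpa using hc
    have hkeys := PySem.Dict.keys_insert_of_not_contains d (if d.contains b then d.getD b 0 + 1 else 0) hc'
    have hv : (d.insert b (if d.contains b then d.getD b 0 + 1 else 0)).values
        = d.values ++ [if d.contains b then d.getD b 0 + 1 else 0] := by
      show (PySem.Dict.insert d b _).items.map Prod.snd = _
      simp [PySem.Dict.insert, hc', PySem.Dict.values]
    rw [hkeys, hv]
    simp [hc']
    ring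

-- loop invariant: over the whole loop, values-sum + key-count grows by the number of blocks processed
theorem loop_measure (bs : List (List Int)) :
    ∀ (d : PySem.Dict (List Int) Int), d.keys.Nodup →
    (bs.foldl (fun d block =>
        if d.contains block then d.insert block (d.getD block 0 + 1)
        else d.insert block 0) d).values.sum
      + (((bs.foldl (fun d block =>
        if d.contains block then d.insert block (d.getD block 0 + 1)
        else d.insert block 0) d).keys.length : Int))
      = d.values.sum + (d.keys.length : Int) + bs.length := by
  induction bs with
  | nil => intro d _; simp
  | cons b t ih =>
    intro d hnd
    simp only [List.foldl_cons, List.length_cons]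
    rw [stepA_eq]
    have hnd' : (d.insert b (if d.contains b then d.getD b 0 + 1 else 0)).keys.Nodup :=
      PySem.Dict.nodup_keys_insert _ _ _ hnd
    rw [ih _ hnd', step_measure d b hnd]
    push_cast
    ring

-- the keys accumulated by A's loop are exactly the distinct blocks, in first-occurrence order
theorem loop_keys (bs : List (List Int)) :
    (bs.foldl (fun d block =>
        if d.contains block then d.insert block (d.getD block 0 + 1)
        else d.insert block 0) (PySem.Dict.empty : PySem.Dict (List Int) Int)).keys
      = PySem.Set.ofList bs := by
  have h : (fun (d : PySem.Dict (List Int) Int) (block : List Int) =>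
      if d.contains block then d.insert block (d.getD block 0 + 1) else d.insert block 0)
      = fun d block => d.insert block (if d.contains block then d.getD block 0 + 1 else 0) := by
    funext d b; exact stepA_eq d b
  rw [h, PySem.Dict.keys_foldl_insert]
  simp [PySem.Set.update, PySem.Set.ofList, PySem.Dict.keys, PySem.Dict.empty]

-- A's result: (number of blocks) - (number of distinct blocks)
theorem A_closed (bs : List (List Int)) :
    (bs.foldl (fun d block =>
        if d.contains block then d.insert block (d.getD block 0 + 1)
        else d.insert block 0) (PySem.Dict.empty : PySem.Dict (List Int) Int)).values.sum
      = (bs.length : Int) - ((PySem.Set.ofList bs).length : Int) := by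
  have h := loop_measure bs PySem.Dict.empty (by simp [PySem.Dict.keys, PySem.Dict.empty])
  rw [loop_keys] at h
  have he : (PySem.Dict.empty : PySem.Dict (List Int) Int).values.sum = (0 : Int) := rfl
  have hk : (PySem.Dict.empty : PySem.Dict (List Int) Int).keys.length = 0 := rfl
  rw [he, hk] at h
  omega

-- on a ≤-sorted list, (adjacent equal pairs) + (distinct elements) = length
theorem adj_plus_card {κ : Type} [LinearOrder κ] [DecidableEq κ] [BEq κ] [LawfulBEq κ]
    (s : List κ) (hs : s.Pairwise (fun a b => a ≤ b)) :
    (s.zip s.tail).countP (fun p => p.1 == p.2) + s.toFinset.card = s.length := by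
  induction s with
  | nil => simp
  | cons x t ih =>
    cases t with
    | nil => simp
    | cons y u =>
      have hxy : x ≤ y := (List.pairwise_cons.1 hs).1 y (by simp)
      have hyu : ∀ z ∈ u, y ≤ z := fun z hz =>
        (List.pairwise_cons.1 (List.pairwise_cons.1 hs).2).1 z hz
      have ih' := ih (List.pairwise_cons.1 hs).2
      simp only [List.tail_cons] at ih'
      by_cases hx : x = y
      · subst hx
        have hts : (x :: x :: u).toFinset = (x :: u).toFinset := by simp
        rw [hts]
        simp only [List.tail_cons, List.zip_cons_cons, List.countP_cons, List.length_cons,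
          beq_self_eq_true, if_pos]
        simp only [List.length_cons] at ih'
        omega
      · have hnotmem : x ∉ y :: u := by
          intro hm
          rcases List.mem_cons.1 hm with h | h
          · exact hx h
          · exact hx (le_antisymm hxy (hyu x h))
        have hts : (x :: y :: u).toFinset.card = (y :: u).toFinset.card + 1 := by
          rw [List.toFinset_cons, Finset.card_insert_of_notMem (by simpa using hnotmem)]
        have hbx : ((x == y) : Bool) = false := by simp [hx]
        rw [hts]
        simp only [List.tail_cons, List.zip_cons_cons, List.countP_cons, List.length_cons, hbx,
          if_neg, Bool.false_eq_true, not_false_eq_true]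
        simp only [List.length_cons] at ih'
        omega

-- distinct count of a Python set literal equals the Finset cardinality
theorem setLen_eq_card (bs : List (List Int)) :
    (PySem.Set.ofList bs).length = bs.toFinset.card := by
  have hnd : (PySem.Set.ofList bs).Nodup := PySem.Set.nodup_ofList bs
  have hto : (PySem.Set.ofList bs).toFinset = bs.toFinset := by
    ext x; simp [PySem.Set.mem_ofList]
  rw [← hto, List.toFinset_card_of_nodup hnd]

-- ===== VERDICT (by name: the statement is the Claim_ definition above) =====
theorem count_repeats_spec : Claim_equal_count_repeats := by
  intro a bl _ _
  unfold Spec_count_repeats count_repeats count_repeats_alt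
  simp only [make_blocks_eq_map, A_closed]
  set bs := (PySem.List.pyRange 0 (PySem.Int.floordiv (a.length : Int) bl) 1).map
      (fun i => PySem.List.slice a (some (i * bl)) (some (i * bl + bl))) with hbs
  set s := PySem.List.sorted bs (fun b => b) false with hsrt
  have hperm : s.Perm bs := PySem.List.sorted_perm bs (fun b => b) false
  have hlen : s.length = bs.length := hperm.length_eq
  have hto : s.toFinset = bs.toFinset := List.toFinset_eq_of_perm s bs hperm
  have hadj : (s.zip s.tail).countP (fun p => p.1 == p.2) + s.toFinset.card = s.length := by
    rw [hsrt]
    convert adj_plus_card _ (PySem.List.sorted_pairwise bs (fun b => b)) using 5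
    congr 1
  rw [hto, hlen] at hadj
  rw [PySem.List.slice_from_one]
  rw [setLen_eq_card]
  have hcard : bs.toFinset.card ≤ bs.length := by
    rw [← hto, ← hlen]; exact (List.toFinset_card_le s)
  omega
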